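-- pv_equiv track=rewrite | github.com/QsingularityAi/Resonance-AI | graphql/services/markdown/base_markdown_converter.py | _format_field_name
-- ===== SOURCE A (Python) =====
-- def _format_field_name(name: str) -> str:
--     """
--     Format a field name for display in markdown.
--
--     Args:
--         name: The field name to format.
--
--     Returns:
--         The formatted field name.
--     """
--     # Convert snake_case or camelCase to Title Case with spaces
--     words = []
--     current_word = ""
--
--     for char in name:
--         if char.isupper() and current_word:
--             words.append(current_word)
--             current_word = char.lower()
--         elif char == '_':
--             if current_word:
--                 words.append(current_word)
--                 current_word = ""
--         else:
--             current_word += char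
--
--     if current_word:
--         words.append(current_word)
--
--     return " ".join(word.capitalize() for word in words)
-- ===== SOURCE B (Python) =====
-- def _format_field_name(name: str) -> str:
--     # phase 1: split the name on underscores
--     pieces = []
--     piece = []
--     for ch in name:
--         if ch == '_':
--             pieces.append(piece)
--             piece = []
--         else:
--             piece.append(ch)
--     pieces.append(piece)
--     # phase 2: split each piece at internal uppercase letters
--     words = []
--     for p in pieces:
--         cur = []
--         for k, ch in enumerate(p):
--             if ch.isupper() and k > 0:
--                 words.append(cur)
--                 cur = [ch]
--             else:
--                 cur.append(ch)
--         if cur: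
--             words.append(cur)
--     return ' '.join(''.join(w).capitalize() for w in words)
-- ===== Notes on version B (the rewrite author's own statement) =====
-- stated objective: alternative
-- what changed: Replaces A's single merged scan (one accumulator handling underscores and uppercase breaks together, lowercasing split chars) by a two-phase pipeline: an explicit split on underscores into pieces, then an enumerate-indexed scan of each piece that starts a new word at every non-initial uppercase letter, finally capitalizing and joining.
import Mathlib
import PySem

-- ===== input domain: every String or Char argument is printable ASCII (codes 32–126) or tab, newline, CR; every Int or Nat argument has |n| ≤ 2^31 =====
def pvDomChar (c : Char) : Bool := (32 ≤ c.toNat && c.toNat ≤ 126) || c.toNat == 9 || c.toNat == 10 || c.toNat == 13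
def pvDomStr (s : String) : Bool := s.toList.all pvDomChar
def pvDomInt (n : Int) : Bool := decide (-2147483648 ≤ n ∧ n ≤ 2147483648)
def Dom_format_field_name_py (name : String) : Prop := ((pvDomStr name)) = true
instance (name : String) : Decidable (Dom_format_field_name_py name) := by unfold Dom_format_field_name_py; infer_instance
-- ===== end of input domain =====

-- B restructures A's single merged scan as a split-on-underscore phase followed by a per-piece
-- uppercase-boundary scan (alternative decomposition, same cost).

-- shared helper: port of str.capitalize (exact on ASCII: first char uppercased, rest lowercased)
def pvCap (w : List Char) : List Char :=
  match w with
  | [] => []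
  | c :: t => PySem.Chars.upperChar c :: t.map PySem.Chars.lowerChar

-- ===== PORT A =====
def aStep (st : List (List Char) × List Char) (ch : Char) : List (List Char) × List Char :=
  if PySem.Chars.isupper ch && !st.2.isEmpty then
    (st.1 ++ [st.2], [PySem.Chars.lowerChar ch])
  else if ch = '_' then
    (if st.2.isEmpty then st else (st.1 ++ [st.2], []))
  else
    (st.1, st.2 ++ [ch])

def format_field_name_py (name : String) : String :=
  let st := name.toList.foldl aStep ([], [])
  let words := if st.2.isEmpty then st.1 else st.1 ++ [st.2]
  String.ofList (PySem.Chars.join [' '] (words.map pvCap))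

-- ===== PORT B =====
-- phase 1: split the name on underscores
def bSplitStep (st : List (List Char) × List Char) (ch : Char) : List (List Char) × List Char :=
  if ch = '_' then (st.1 ++ [st.2], []) else (st.1, st.2 ++ [ch])

-- phase 2: split one piece at internal uppercase letters (the k > 0 test via enumerate)
def bWordStep (st : List (List Char) × List Char) (kc : Int × Char) : List (List Char) × List Char :=
  if PySem.Chars.isupper kc.2 && decide (0 < kc.1) then
    (st.1 ++ [st.2], [kc.2])
  else
    (st.1, st.2 ++ [kc.2])

def bPieceStep (ws : List (List Char)) (p : List Char) : List (List Char) :=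
  let st := (PySem.List.enumerate p).foldl bWordStep (ws, [])
  if st.2.isEmpty then st.1 else st.1 ++ [st.2]

def format_field_name_py_alt (name : String) : String :=
  let sp := name.toList.foldl bSplitStep ([], [])
  let pieces := sp.1 ++ [sp.2]
  let words := pieces.foldl bPieceStep []
  String.ofList (PySem.Chars.join [' '] (words.map pvCap))

-- ===== PRECONDITION & SPEC =====
def Spec_format_field_name_py (name : String) (out : String) : Prop := out = format_field_name_py_alt name
instance (name : String) (out : String) : Decidable (Spec_format_field_name_py name out) := by unfold Spec_format_field_name_py; infer_instance

-- ===== CLAIM (what is proved, stated in full; the proofs are below) =====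
def Claim_equal_format_field_name_py : Prop := ∀ (name : String), Dom_format_field_name_py name → Spec_format_field_name_py name (format_field_name_py name)

-- ===== LEMMAS AND PROOFS =====

-- reference word-splitter (B-flavoured: the split char keeps its case)
def flushW (cur : List Char) : List (List Char) := if cur = [] then [] else [cur]

def refNZ : List Char → List Char → List (List Char)
  | [], cur => flushW cur
  | c :: t, cur =>
    if PySem.Chars.isupper c = true ∧ cur ≠ [] then cur :: refNZ t [c]
    else refNZ t (cur ++ [c])

def refW : List Char → List Char → List (List Char)
  | [], cur => flushW cur
  | c :: t, cur =>
    if c = '_' then flushW cur ++ refW t []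
    else if PySem.Chars.isupper c = true ∧ cur ≠ [] then cur :: refW t [c]
    else refW t (cur ++ [c])

def refSplit : List Char → List (List Char)
  | [] => [[]]
  | c :: t =>
    if c = '_' then [] :: refSplit t
    else
      match refSplit t with
      | [] => [[c]]
      | p :: ps => (c :: p) :: ps

def prependFirst (cur : List Char) : List (List Char) → List (List Char)
  | [] => [cur]
  | p :: ps => (cur ++ p) :: ps

def refNZ0 (p : List Char) : List (List Char) :=
  match p with
  | [] => []
  | c :: t => refNZ t [c]

def pwords (ps : List (List Char)) : List (List Char) := ps.flatMap refNZ0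

def finW (st : List (List Char) × List Char) : List (List Char) :=
  if st.2.isEmpty then st.1 else st.1 ++ [st.2]

def noUpTail (cur : List Char) : Prop :=
  cur = [] ∨ ∃ c t, cur = c :: t ∧ ∀ a ∈ t, PySem.Chars.isupper a = false

def RelCW (cwA cwB : List Char) : Prop :=
  cwA = cwB ∨ ∃ c t, PySem.Chars.isupper c = true ∧ cwB = c :: t ∧ cwA = PySem.Chars.lowerChar c :: t

lemma char_le_toNat {a b : Char} : a ≤ b ↔ a.toNat ≤ b.toNat := by
  rw [Char.le_def, UInt32.le_iff_toNat_le]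
  exact Iff.rfl

lemma isupper_toNat {c : Char} (h : PySem.Chars.isupper c = true) :
    65 ≤ c.toNat ∧ c.toNat ≤ 90 := by
  simp only [PySem.Chars.isupper, Bool.and_eq_true, decide_eq_true_eq, char_le_toNat] at h
  exact h

lemma upperChar_lowerChar (c : Char) (h : PySem.Chars.isupper c = true) :
    PySem.Chars.upperChar (PySem.Chars.lowerChar c) = c := by
  obtain ⟨hA, hZ⟩ := isupper_toNat h
  have hval : (c.toNat + 32).isValidChar := Or.inl (by omega)
  have hlow : PySem.Chars.lowerChar c = Char.ofNat (c.toNat + 32) := by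
    simp [PySem.Chars.lowerChar, h]
  have htn : (Char.ofNat (c.toNat + 32)).toNat = c.toNat + 32 := by
    rw [Char.toNat_ofNat]; simp [hval]
  have hlo : PySem.Chars.islower (Char.ofNat (c.toNat + 32)) = true := by
    simp only [PySem.Chars.islower, Bool.and_eq_true, decide_eq_true_eq, char_le_toNat, htn]
    constructor
    · show Char.toNat 'a' ≤ c.toNat + 32
      have : Char.toNat 'a' = 97 := by decide
      omega
    · show c.toNat + 32 ≤ Char.toNat 'z'
      have : Char.toNat 'z' = 122 := by decide
      omega
  rw [hlow]
  simp only [PySem.Chars.upperChar, hlo, if_true]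
  rw [htn]
  have h32 : c.toNat + 32 - 32 = c.toNat := by omega
  rw [h32, Char.ofNat_toNat]

lemma upperChar_of_upper (c : Char) (h : PySem.Chars.isupper c = true) :
    PySem.Chars.upperChar c = c := by
  obtain ⟨hA, hZ⟩ := isupper_toNat h
  have hlo : PySem.Chars.islower c = false := by
    simp only [PySem.Chars.islower, Bool.and_eq_false_iff, decide_eq_false_iff_not, char_le_toNat]
    left
    show ¬ (Char.toNat 'a' ≤ c.toNat)
    have : Char.toNat 'a' = 97 := by decide
    omega
  simp [PySem.Chars.upperChar, hlo]

lemma cap_rel {cwA cwB : List Char} (h : RelCW cwA cwB) : pvCap cwA = pvCap cwB := by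
  rcases h with h | ⟨c, t, hup, hB, hA⟩
  · rw [h]
  · rw [hA, hB]
    simp only [pvCap, upperChar_lowerChar c hup, upperChar_of_upper c hup]

lemma rel_nil_iff {cwA cwB : List Char} (h : RelCW cwA cwB) : cwA = [] ↔ cwB = [] := by
  rcases h with h | ⟨c, t, _, hB, hA⟩
  · rw [h]
  · rw [hA, hB]; simp

lemma not_upper_underscore : PySem.Chars.isupper '_' = false := by decide

-- accumulator-shift lemmas
lemma foldA_shift (cs : List Char) (ws : List (List Char)) (cw : List Char) :
    cs.foldl aStep (ws, cw) = (ws ++ (cs.foldl aStep ([], cw)).1, (cs.foldl aStep ([], cw)).2) := by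
  induction cs generalizing ws cw with
  | nil => simp
  | cons c t ih =>
    have hstep : ∀ ws', aStep (ws', cw) c = (ws' ++ (aStep ([], cw) c).1, (aStep ([], cw) c).2) := by
      intro ws'; unfold aStep
      by_cases h1 : (PySem.Chars.isupper c && !cw.isEmpty) = true
      · simp [h1]
      · by_cases h2 : c = '_'
        · by_cases h3 : cw.isEmpty <;> simp [h2, h3, not_upper_underscore]
        · simp [h1, h2]
    rcases hp : aStep ([], cw) c with ⟨d, cw'⟩
    simp only [List.foldl_cons, hstep ws, hp]
    rw [ih (ws ++ d) cw', ih d cw', List.append_assoc]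

lemma foldS_shift (cs : List Char) (ws : List (List Char)) (cw : List Char) :
    cs.foldl bSplitStep (ws, cw) = (ws ++ (cs.foldl bSplitStep ([], cw)).1, (cs.foldl bSplitStep ([], cw)).2) := by
  induction cs generalizing ws cw with
  | nil => simp
  | cons c t ih =>
    have hstep : ∀ ws', bSplitStep (ws', cw) c = (ws' ++ (bSplitStep ([], cw) c).1, (bSplitStep ([], cw) c).2) := by
      intro ws'; unfold bSplitStep
      by_cases h1 : c = '_' <;> simp [h1]
    rcases hp : bSplitStep ([], cw) c with ⟨d, cw'⟩
    simp only [List.foldl_cons, hstep ws, hp]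
    rw [ih (ws ++ d) cw', ih d cw', List.append_assoc]

lemma foldWd_shift (xs : List (Int × Char)) (ws : List (List Char)) (cw : List Char) :
    xs.foldl bWordStep (ws, cw) = (ws ++ (xs.foldl bWordStep ([], cw)).1, (xs.foldl bWordStep ([], cw)).2) := by
  induction xs generalizing ws cw with
  | nil => simp
  | cons kc t ih =>
    have hstep : ∀ ws', bWordStep (ws', cw) kc = (ws' ++ (bWordStep ([], cw) kc).1, (bWordStep ([], cw) kc).2) := by
      intro ws'; unfold bWordStep
      by_cases h1 : (PySem.Chars.isupper kc.2 && decide (0 < kc.1)) = true <;> simp [h1]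
    rcases hp : bWordStep ([], cw) kc with ⟨d, cw'⟩
    simp only [List.foldl_cons, hstep ws, hp]
    rw [ih (ws ++ d) cw', ih d cw', List.append_assoc]

lemma finW_append (ws : List (List Char)) (st : List (List Char) × List Char) :
    finW (ws ++ st.1, st.2) = ws ++ finW st := by
  rcases st with ⟨ws', cw⟩
  unfold finW
  by_cases h : cw.isEmpty <;> simp [h]

-- A-side main lemma
lemma A_main (cs : List Char) (cwA cwB : List Char) (h : RelCW cwA cwB) :
    (finW (cs.foldl aStep ([], cwA))).map pvCap = (refW cs cwB).map pvCap := by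
  induction cs generalizing cwA cwB with
  | nil =>
    simp only [List.foldl_nil, refW]
    by_cases hB : cwB = []
    · have hAe : cwA = [] := (rel_nil_iff h).2 hB
      simp [finW, flushW, hAe, hB]
    · have hAe : cwA ≠ [] := fun he => hB ((rel_nil_iff h).1 he)
      simp only [finW, flushW, if_neg hB]
      rw [if_neg (by simpa [List.isEmpty_iff] using hAe)]
      simp [cap_rel h]
  | cons c t ih =>
    by_cases hu : PySem.Chars.isupper c = true ∧ cwA ≠ []
    · have hBne : cwB ≠ [] := fun he => hu.2 ((rel_nil_iff h).2 he)
      have hcond : (PySem.Chars.isupper c && !cwA.isEmpty) = true := by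
        simp [hu.1, hu.2]
      have hstep : aStep ([], cwA) c = ([cwA], [PySem.Chars.lowerChar c]) := by
        unfold aStep; simp [hcond]
      have hc_ : c ≠ '_' := by
        intro he
        rw [he] at hu
        rw [not_upper_underscore] at hu
        exact absurd hu.1 (by simp)
      rw [List.foldl_cons, hstep, foldA_shift t [cwA] [PySem.Chars.lowerChar c], finW_append]
      have hrel : RelCW [PySem.Chars.lowerChar c] [c] := Or.inr ⟨c, [], hu.1, rfl, rfl⟩
      simp only [refW]
      rw [if_neg hc_, if_pos ⟨hu.1, hBne⟩]
      simp only [List.map_cons, List.singleton_append]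
      rw [cap_rel h, ih _ _ hrel]
    · by_cases hund : c = '_'
      · have hcond : (PySem.Chars.isupper c && !cwA.isEmpty) = false := by
          rw [hund, not_upper_underscore]; simp
        have hstep : aStep ([], cwA) c = (flushW cwA, []) := by
          unfold aStep
          rw [hund]
          by_cases hA0 : cwA = []
          · simp [not_upper_underscore, hA0, flushW]
          · simp [not_upper_underscore, List.isEmpty_iff, hA0, flushW]
        rw [List.foldl_cons, hstep, foldA_shift t (flushW cwA) [], finW_append]
        simp only [refW]
        rw [if_pos hund]
        simp only [List.map_append]
        rw [ih [] [] (Or.inl rfl)]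
        congr 1
        by_cases hB0 : cwB = []
        · simp [flushW, (rel_nil_iff h).2 hB0, hB0]
        · have hA0 : cwA ≠ [] := fun he => hB0 ((rel_nil_iff h).1 he)
          simp [flushW, hA0, hB0, cap_rel h]
      · have hcond : (PySem.Chars.isupper c && !cwA.isEmpty) = false := by
          by_cases hup' : PySem.Chars.isupper c = true
          · have hA0 : cwA = [] := by
              by_contra hne; exact hu ⟨hup', hne⟩
            simp [hA0]
          · have : PySem.Chars.isupper c = false := by simpa using hup'
            simp [this]
        have hstep : aStep ([], cwA) c = ([], cwA ++ [c]) := by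
          unfold aStep; simp [hcond, hund]
        have hrel : RelCW (cwA ++ [c]) (cwB ++ [c]) := by
          rcases h with h | ⟨d, t', hupd, hB, hA⟩
          · exact Or.inl (by rw [h])
          · exact Or.inr ⟨d, t' ++ [c], hupd, by rw [hB]; rfl, by rw [hA]; rfl⟩
        have hnotB : ¬ (PySem.Chars.isupper c = true ∧ cwB ≠ []) := by
          rintro ⟨hup', hBne⟩
          exact hu ⟨hup', fun he => hBne ((rel_nil_iff h).1 he)⟩
        rw [List.foldl_cons, hstep]
        simp only [refW]
        rw [if_neg hund, if_neg hnotB]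
        exact ih _ _ hrel

-- B-side lemmas
lemma refSplit_ne_nil (t : List Char) : refSplit t ≠ [] := by
  cases t with
  | nil => simp [refSplit]
  | cons c s =>
    simp only [refSplit]
    split_ifs
    · simp
    · rcases refSplit s with _ | ⟨q, qs⟩ <;> simp

lemma B_split (cs : List Char) (p : List Char) :
    (cs.foldl bSplitStep ([], p)).1 ++ [(cs.foldl bSplitStep ([], p)).2] = prependFirst p (refSplit cs) := by
  induction cs generalizing p with
  | nil => simp [prependFirst, refSplit]
  | cons c t ih =>
    by_cases hc : c = '_'
    · have hstep : bSplitStep ([], p) c = ([p], []) := by unfold bSplitStep; simp [hc]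
      rw [List.foldl_cons, hstep, foldS_shift t [p] []]
      simp only [refSplit]
      rw [if_pos hc]
      have iht := ih []
      rcases hrs : refSplit t with _ | ⟨q, qs⟩
      · exact absurd hrs (refSplit_ne_nil t)
      · rw [hrs] at iht
        simp only [prependFirst, List.nil_append] at iht
        simp only [prependFirst, List.append_nil]
        rw [List.append_assoc]
        simp only [List.singleton_append]
        rw [iht]
    · have hstep : bSplitStep ([], p) c = ([], p ++ [c]) := by unfold bSplitStep; simp [hc]
      rw [List.foldl_cons, hstep, ih (p ++ [c])]
      simp only [refSplit]
      rw [if_neg hc]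
      rcases hrs : refSplit t with _ | ⟨q, qs⟩
      · exact absurd hrs (refSplit_ne_nil t)
      · simp [prependFirst, List.append_assoc]

lemma bPieceStep_eq (ws : List (List Char)) (p : List Char) :
    bPieceStep ws p = finW ((PySem.List.enumerate p).foldl bWordStep (ws, [])) := rfl

lemma B_inner (t : List Char) (s : Int) (cur : List Char) (hs : 1 ≤ s) (hc : cur ≠ []) :
    finW ((PySem.List.enumerate t s).foldl bWordStep ([], cur)) = refNZ t cur := by
  induction t generalizing s cur with
  | nil =>
    rw [PySem.List.enumerate_nil]
    simp only [List.foldl_nil, finW, refNZ, flushW]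
    rw [if_neg (by simpa [List.isEmpty_iff] using hc), if_neg hc]
    simp
  | cons c t ih =>
    rw [PySem.List.enumerate_cons]
    by_cases hu : PySem.Chars.isupper c = true
    · have hstep : bWordStep ([], cur) (s, c) = ([cur], [c]) := by
        unfold bWordStep; simp [hu, show (0:Int) < s by omega]
      rw [List.foldl_cons, hstep, foldWd_shift _ [cur] [c], finW_append,
          ih (s + 1) [c] (by omega) (by simp)]
      simp only [refNZ]
      rw [if_pos ⟨hu, hc⟩]
      simp
    · have hu' : PySem.Chars.isupper c = false := by simpa using hu
      have hstep : bWordStep ([], cur) (s, c) = ([], cur ++ [c]) := by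
        unfold bWordStep; simp [hu']
      rw [List.foldl_cons, hstep, ih (s + 1) (cur ++ [c]) (by omega) (by simp)]
      simp only [refNZ]
      rw [if_neg (by simp [hu'])]

lemma B_piece (p : List Char) : bPieceStep [] p = refNZ0 p := by
  cases p with
  | nil =>
    rw [bPieceStep_eq, PySem.List.enumerate_nil]
    simp [finW, refNZ0]
  | cons c t =>
    rw [bPieceStep_eq, PySem.List.enumerate_cons]
    have hstep : bWordStep ([], []) ((0 : Int), c) = ([], [c]) := by
      unfold bWordStep; simp
    rw [List.foldl_cons, hstep]
    have h01 : (0 : Int) + 1 = 1 := by norm_num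
    rw [h01, B_inner t 1 [c] (by norm_num) (by simp)]
    rfl

lemma bPieceStep_shift (ws : List (List Char)) (p : List Char) :
    bPieceStep ws p = ws ++ bPieceStep [] p := by
  rw [bPieceStep_eq, bPieceStep_eq, foldWd_shift _ ws [], finW_append]

lemma B_outer (ps : List (List Char)) (ws : List (List Char)) :
    ps.foldl bPieceStep ws = ws ++ pwords ps := by
  induction ps generalizing ws with
  | nil => simp [pwords]
  | cons p ps ih =>
    rw [List.foldl_cons, ih, bPieceStep_shift, B_piece]
    simp [pwords, List.append_assoc]

-- glue lemmas
lemma refNZ_skip (t : List Char) (x : List Char) (cur : List Char)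
    (h : ∀ a ∈ t, PySem.Chars.isupper a = false) (hc : cur ≠ []) :
    refNZ (t ++ x) cur = refNZ x (cur ++ t) := by
  induction t generalizing cur with
  | nil => simp
  | cons a t ih =>
    have ha : PySem.Chars.isupper a = false := h a (by simp)
    rw [List.cons_append]
    simp only [refNZ]
    rw [if_neg (by simp [ha])]
    rw [ih (cur ++ [a]) (fun b hb => h b (List.mem_cons_of_mem a hb)) (by simp)]
    simp [List.append_assoc]

lemma refNZ0_flush (cur : List Char) (h : noUpTail cur) : refNZ0 cur = flushW cur := by
  rcases h with h | ⟨c, t, hct, hnt⟩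
  · simp [h, refNZ0, flushW]
  · rw [hct]
    show refNZ t [c] = flushW (c :: t)
    have hsk := refNZ_skip t [] [c] hnt (by simp)
    rw [List.append_nil] at hsk
    rw [hsk]
    simp [refNZ, flushW]

lemma glue (cs : List Char) (cur : List Char) (h : noUpTail cur) :
    refW cs cur = pwords (prependFirst cur (refSplit cs)) := by
  induction cs generalizing cur with
  | nil =>
    simp only [refW, refSplit, prependFirst, pwords, List.flatMap_cons, List.flatMap_nil,
      List.append_nil]
    rw [refNZ0_flush _ h]
  | cons c t ih =>
    by_cases hc : c = '_'
    · simp only [refW, refSplit]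
      rw [if_pos hc, if_pos hc]
      rcases hrs : refSplit t with _ | ⟨q, qs⟩
      · exact absurd hrs (refSplit_ne_nil t)
      · have iht := ih [] (Or.inl rfl)
        rw [hrs] at iht
        simp only [prependFirst, List.nil_append] at iht
        simp only [prependFirst, List.append_nil, pwords, List.flatMap_cons]
        rw [refNZ0_flush _ h, iht]
        simp [pwords]
    · by_cases hup : PySem.Chars.isupper c = true ∧ cur ≠ []
      · obtain ⟨d, t', hct, hnt⟩ : ∃ d t', cur = d :: t' ∧ ∀ a ∈ t', PySem.Chars.isupper a = false := by
          rcases h with h0 | hh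
          · exact absurd h0 hup.2
          · exact hh
        simp only [refW, refSplit]
        rw [if_neg hc, if_neg hc, if_pos hup]
        rcases hrs : refSplit t with _ | ⟨q, qs⟩
        · exact absurd hrs (refSplit_ne_nil t)
        · have iht := ih [c] (Or.inr ⟨c, [], rfl, by simp⟩)
          rw [hrs] at iht
          simp only [prependFirst, List.singleton_append] at iht
          simp only [prependFirst, pwords, List.flatMap_cons]
          have hr : refNZ0 (cur ++ c :: q) = cur :: refNZ q [c] := by
            rw [hct]
            show refNZ (t' ++ c :: q) [d] = (d :: t') :: refNZ q [c]
            rw [refNZ_skip t' (c :: q) [d] hnt (by simp)]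
            simp only [refNZ]
            rw [if_pos ⟨hup.1, by simp⟩]
            simp
          rw [hr, iht]
          simp [pwords, refNZ0]
      · simp only [refW, refSplit]
        rw [if_neg hc, if_neg hc, if_neg hup]
        have hnut : noUpTail (cur ++ [c]) := by
          rcases h with h0 | ⟨d, t', hct, hnt⟩
          · exact Or.inr ⟨c, [], by rw [h0]; rfl, by simp⟩
          · have hcu : PySem.Chars.isupper c = false := by
              by_contra hne
              exact hup ⟨by simpa using hne, by rw [hct]; simp⟩
            refine Or.inr ⟨d, t' ++ [c], by rw [hct]; rfl, ?_⟩
            intro a ha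
            rcases List.mem_append.mp ha with ha | ha
            · exact hnt a ha
            · simp at ha; rw [ha]; exact hcu
        rw [ih (cur ++ [c]) hnut]
        rcases hrs : refSplit t with _ | ⟨q, qs⟩
        · exact absurd hrs (refSplit_ne_nil t)
        · simp [prependFirst, List.append_assoc]

-- ===== VERDICT (by name: the statement is the Claim_ definition above) =====
theorem format_field_name_py_spec : Claim_equal_format_field_name_py := by
  intro name _
  show format_field_name_py name = format_field_name_py_alt name
  have hA := A_main name.toList [] [] (Or.inl rfl)
  have hglue : refW name.toList [] = pwords (refSplit name.toList) := by
    have hg := glue name.toList [] (Or.inl rfl)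
    rcases hrs : refSplit name.toList with _ | ⟨q, qs⟩
    · exact absurd hrs (refSplit_ne_nil _)
    · rw [hrs] at hg
      simpa [prependFirst] using hg
  have hB : ((name.toList.foldl bSplitStep ([], [])).1 ++ [(name.toList.foldl bSplitStep ([], [])).2]).foldl bPieceStep ([] : List (List Char)) = pwords (refSplit name.toList) := by
    rw [B_outer, B_split]
    rcases hrs : refSplit name.toList with _ | ⟨q, qs⟩
    · exact absurd hrs (refSplit_ne_nil _)
    · simp [prependFirst]
  show String.ofList (PySem.Chars.join [' '] ((finW (name.toList.foldl aStep ([], []))).map pvCap)) =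
       String.ofList (PySem.Chars.join [' '] ((((name.toList.foldl bSplitStep ([], [])).1 ++ [(name.toList.foldl bSplitStep ([], [])).2]).foldl bPieceStep []).map pvCap))
  rw [hA, hglue, hB]
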